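-- pv_equiv track=rewrite | github.com/kubernetes-sigs/karpenter | designs/scripts/balanced-consolidation-properties.py | _dfs_longest_chain
-- ===== SOURCE A (Python) =====
-- PRICES = sorted([
--     446, 892, 1785, 3570, 7140,     # c7i
--     504, 1008, 2016, 4032, 8064,    # m7i
--     661, 1323, 2646, 5292, 10584,   # r7i
-- ])
--
-- def approved(k, savings, move_disruption, pool_cost, pool_disruption):
--     """Cross-multiplied decision rule. Handles zero-disruption edge case."""
--     if move_disruption == 0:
--         return savings > 0
--     if pool_disruption == 0:
--         return savings > 0
--     if pool_cost == 0:
--         return False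
--     return k * savings * pool_disruption >= move_disruption * pool_cost
--
-- def _dfs_longest_chain(k, current_price, chain, move_disruption, other_cost, other_disruption):
--     """Return the longest chain reachable from current_price via any sequence of approved replaces."""
--     best = list(chain)
--     for np in PRICES:
--         if np >= current_price:
--             continue
--         savings = current_price - np
--         pool_cost = current_price + other_cost
--         pool_disruption = move_disruption + other_disruption
--         if approved(k, savings, move_disruption, pool_cost, pool_disruption):
--             candidate = _dfs_longest_chain(
--                 k, np, chain + [np],
--                 move_disruption, other_cost, other_disruption,
--             )
--             if len(candidate) > len(best):
--                 best = candidate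
--     return best
-- ===== SOURCE B (Python) =====
-- PRICES = sorted([
--     446, 892, 1785, 3570, 7140,     # c7i
--     504, 1008, 2016, 4032, 8064,    # m7i
--     661, 1323, 2646, 5292, 10584,   # r7i
-- ])
--
-- def approved(k, savings, move_disruption, pool_cost, pool_disruption):
--     if move_disruption == 0:
--         return savings > 0
--     if pool_disruption == 0:
--         return savings > 0
--     if pool_cost == 0:
--         return False
--     return k * savings * pool_disruption >= move_disruption * pool_cost
--
-- def _dfs_longest_chain(k, current_price, chain, move_disruption, other_cost, other_disruption):
--     """Longest-path DP over the fixed price DAG: memoize, for each price in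
--     ascending order, the best suffix chain starting from it (O(n^2) table
--     instead of enumerating every decreasing path)."""
--     pool_disruption = move_disruption + other_disruption
--     memo = {}  # price -> best suffix chain starting strictly below that price
--
--     def best_from(p):
--         best = []
--         for np in PRICES:
--             if np >= p:
--                 break  # PRICES is sorted ascending
--             if approved(k, p - np, move_disruption, p + other_cost, pool_disruption):
--                 cand = [np] + memo[np]
--                 if len(cand) > len(best):
--                     best = cand
--         return best
--
--     for p in PRICES:
--         memo[p] = best_from(p)
--     return chain + best_from(current_price)
-- ===== Notes on version B (the rewrite author's own statement) =====
-- stated objective: faster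
-- what changed: Replaced the exponential DFS over all decreasing approved price paths by a longest-path dynamic program: the best suffix chain is memoized per price in one ascending pass over the fixed sorted PRICES table, and the chain prefix is appended once.
import Mathlib
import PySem

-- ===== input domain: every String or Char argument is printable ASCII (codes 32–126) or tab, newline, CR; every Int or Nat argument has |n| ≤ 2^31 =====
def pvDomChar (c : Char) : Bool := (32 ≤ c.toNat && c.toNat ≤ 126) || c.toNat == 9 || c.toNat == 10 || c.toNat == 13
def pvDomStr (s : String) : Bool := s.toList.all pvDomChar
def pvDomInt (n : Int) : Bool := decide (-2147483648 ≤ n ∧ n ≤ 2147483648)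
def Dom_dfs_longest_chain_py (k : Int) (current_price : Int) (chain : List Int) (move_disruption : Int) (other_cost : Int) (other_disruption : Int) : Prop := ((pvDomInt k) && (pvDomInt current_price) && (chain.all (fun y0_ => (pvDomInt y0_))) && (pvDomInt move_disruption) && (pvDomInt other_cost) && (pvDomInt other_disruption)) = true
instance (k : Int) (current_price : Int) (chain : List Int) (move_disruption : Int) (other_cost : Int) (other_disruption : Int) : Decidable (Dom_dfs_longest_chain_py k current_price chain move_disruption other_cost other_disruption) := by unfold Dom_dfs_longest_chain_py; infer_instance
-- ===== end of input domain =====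

-- B replaces A's exponential DFS over all decreasing approved price paths by a memoized
-- longest-path DP over the fixed sorted PRICES table (objective: faster).

-- ===== PORT A =====
-- PRICES = sorted([...])
def pvPRICES : List Int :=
  PySem.List.sorted [446, 892, 1785, 3570, 7140,
                     504, 1008, 2016, 4032, 8064,
                     661, 1323, 2646, 5292, 10584] (fun x => x) false

-- approved(k, savings, move_disruption, pool_cost, pool_disruption)
def pvApproved (k savings move_disruption pool_cost pool_disruption : Int) : Bool :=
  if move_disruption == 0 then decide (savings > 0)
  else if pool_disruption == 0 then decide (savings > 0)
  else if pool_cost == 0 then false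
  else decide (k * savings * pool_disruption ≥ move_disruption * pool_cost)

-- _dfs_longest_chain, with a fuel guard only to make the same recursion total:
-- every recursive call moves to a strictly smaller element of the 15-element
-- pvPRICES, so the depth is at most 15 and fuel 16 is never exhausted.
def pvDfsA (fuel : Nat) (k : Int) (current_price : Int) (chain : List Int)
    (move_disruption : Int) (other_cost : Int) (other_disruption : Int) : List Int :=
  match fuel with
  | 0 => chain
  | fuel + 1 =>
    pvPRICES.foldl (fun best np =>
      if np ≥ current_price then best
      else
        let savings := current_price - np
        let pool_cost := current_price + other_cost
        let pool_disruption := move_disruption + other_disruption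
        if pvApproved k savings move_disruption pool_cost pool_disruption then
          let candidate := pvDfsA fuel k np (chain ++ [np]) move_disruption other_cost other_disruption
          if candidate.length > best.length then candidate else best
        else best) chain

def dfs_longest_chain_py (k : Int) (current_price : Int) (chain : List Int) (move_disruption : Int) (other_cost : Int) (other_disruption : Int) : List Int :=
  pvDfsA 16 k current_price chain move_disruption other_cost other_disruption

-- ===== PORT B =====
-- best_from(p): loop over PRICES with break at np >= p; memo[np] is always
-- present when read (every np < p was inserted earlier), so the lookup is getD.
def pvBestFromGo (k move_disruption other_cost pool_disruption : Int)
    (memo : PySem.Dict Int (List Int)) (p : Int) : List Int → List Int → List Int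
  | [], best => best
  | np :: rest, best =>
    if np ≥ p then best  -- break: PRICES is sorted ascending
    else if pvApproved k (p - np) move_disruption (p + other_cost) pool_disruption then
      let cand := np :: memo.getD np []
      if cand.length > best.length then pvBestFromGo k move_disruption other_cost pool_disruption memo p rest cand
      else pvBestFromGo k move_disruption other_cost pool_disruption memo p rest best
    else pvBestFromGo k move_disruption other_cost pool_disruption memo p rest best

def pvBestFrom (k move_disruption other_cost pool_disruption : Int)
    (memo : PySem.Dict Int (List Int)) (p : Int) : List Int :=
  pvBestFromGo k move_disruption other_cost pool_disruption memo p pvPRICES []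

def dfs_longest_chain_py_alt (k : Int) (current_price : Int) (chain : List Int) (move_disruption : Int) (other_cost : Int) (other_disruption : Int) : List Int :=
  let pool_disruption := move_disruption + other_disruption
  let memo := pvPRICES.foldl
    (fun m p => m.insert p (pvBestFrom k move_disruption other_cost pool_disruption m p))
    PySem.Dict.empty
  chain ++ pvBestFrom k move_disruption other_cost pool_disruption memo current_price

-- ===== PRECONDITION & SPEC =====
def Spec_dfs_longest_chain_py (k : Int) (current_price : Int) (chain : List Int) (move_disruption : Int) (other_cost : Int) (other_disruption : Int) (out : List Int) : Prop := out = dfs_longest_chain_py_alt k current_price chain move_disruption other_cost other_disruption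
instance (k : Int) (current_price : Int) (chain : List Int) (move_disruption : Int) (other_cost : Int) (other_disruption : Int) (out : List Int) : Decidable (Spec_dfs_longest_chain_py k current_price chain move_disruption other_cost other_disruption out) := by unfold Spec_dfs_longest_chain_py; infer_instance

-- ===== CLAIM (what is proved, stated in full; the proofs are below) =====
def Claim_equal_dfs_longest_chain_py : Prop := ∀ (k : Int) (current_price : Int) (chain : List Int) (move_disruption : Int) (other_cost : Int) (other_disruption : Int), Dom_dfs_longest_chain_py k current_price chain move_disruption other_cost other_disruption → Spec_dfs_longest_chain_py k current_price chain move_disruption other_cost other_disruption (dfs_longest_chain_py k current_price chain move_disruption other_cost other_disruption)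

-- ===== LEMMAS AND PROOFS =====

-- the chain-independent "best suffix from price cp" function, with fuel
def pvG (k md oc od : Int) : Nat → Int → List Int
  | 0, _ => []
  | f + 1, cp =>
    pvPRICES.foldl (fun best np =>
      if np ≥ cp then best
      else if pvApproved k (cp - np) md (cp + oc) (md + od) then
        let cand := np :: pvG k md oc od f np
        if cand.length > best.length then cand else best
      else best) []

def pvD (p : Int) : Nat := (pvPRICES.filter (fun x => decide (x < p))).length

theorem pvPRICES_eq : pvPRICES = [446, 504, 661, 892, 1008, 1323, 1785, 2016, 2646, 3570, 4032, 5292, 7140, 8064, 10584] := by decide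

theorem pv_filter_mono (np p : Int) (h : np < p) :
    ∀ l : List Int, (l.filter (fun x => decide (x < np))).length ≤ (l.filter (fun x => decide (x < p))).length := by
  intro l
  induction l with
  | nil => simp
  | cons a l ih =>
    by_cases h1 : a < np
    · have h2 : a < p := lt_trans h1 h
      simp [List.filter, h1, h2]; omega
    · by_cases h2 : a < p <;> simp [List.filter, h1, h2] <;> omega

theorem pv_filter_strict (np p : Int) (h : np < p) :
    ∀ l : List Int, np ∈ l → (l.filter (fun x => decide (x < np))).length < (l.filter (fun x => decide (x < p))).length := by
  intro l
  induction l with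
  | nil => simp
  | cons a l ih =>
    intro hm
    rcases List.mem_cons.mp hm with rfl | hm
    · have h1 : ¬ (np < np) := lt_irrefl np
      simp only [List.filter, h1, decide_false, h, decide_true, List.length_cons]
      have := pv_filter_mono np p h l
      omega
    · have := ih hm
      by_cases h1 : a < np
      · have h2 : a < p := lt_trans h1 h
        simp only [List.filter, h1, h2, decide_true, List.length_cons]; omega
      · by_cases h2 : a < p <;>
          simp only [List.filter, h1, h2, decide_true, decide_false, List.length_cons] <;> omega

theorem pvD_lt {np p : Int} (hm : np ∈ pvPRICES) (h : np < p) : pvD np < pvD p :=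
  pv_filter_strict np p h pvPRICES hm

theorem pv_filter_lt_len (np : Int) :
    ∀ l : List Int, np ∈ l → (l.filter (fun x => decide (x < np))).length < l.length := by
  intro l
  induction l with
  | nil => simp
  | cons a l ih =>
    intro hm
    rcases List.mem_cons.mp hm with rfl | hm
    · have h1 : ¬ (np < np) := lt_irrefl np
      simp only [List.filter, h1, decide_false, List.length_cons]
      have := List.length_filter_le (fun x => decide (x < np)) l
      omega
    · have := ih hm
      by_cases h1 : a < np <;>
        simp only [List.filter, h1, decide_true, decide_false, List.length_cons] <;> omega

theorem pvD_lt_card {np : Int} (hm : np ∈ pvPRICES) : pvD np < 15 := by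
  have h2 := pv_filter_lt_len np pvPRICES hm
  have : pvPRICES.length = 15 := by rw [pvPRICES_eq]; rfl
  unfold pvD; omega

-- fuel stability of pvG
theorem pvG_stable (k md oc od : Int) :
    ∀ f1 : Nat, ∀ f2 : Nat, ∀ p : Int, pvD p < f1 → pvD p < f2 →
      pvG k md oc od f1 p = pvG k md oc od f2 p := by
  intro f1
  induction f1 with
  | zero => intro f2 p h; omega
  | succ n ih =>
    intro f2 p h1 h2
    match f2 with
    | 0 => omega
    | m + 1 =>
      show pvG k md oc od (n + 1) p = pvG k md oc od (m + 1) p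
      simp only [pvG]
      have : ∀ l : List Int, (∀ np ∈ l, np ∈ pvPRICES) → ∀ b : List Int,
          l.foldl (fun best np =>
            if np ≥ p then best
            else if pvApproved k (p - np) md (p + oc) (md + od) then
              let cand := np :: pvG k md oc od n np
              if cand.length > best.length then cand else best
            else best) b =
          l.foldl (fun best np =>
            if np ≥ p then best
            else if pvApproved k (p - np) md (p + oc) (md + od) then
              let cand := np :: pvG k md oc od m np
              if cand.length > best.length then cand else best
            else best) b := by
        intro l
        induction l with
        | nil => intro _ _; rfl
        | cons np rest ihl =>
          intro hmem b
          have hrest : ∀ x ∈ rest, x ∈ pvPRICES := fun x hx => hmem x (List.mem_cons_of_mem _ hx)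
          simp only [List.foldl_cons]
          by_cases hge : np ≥ p
          · simp only [hge, if_pos]; exact ihl hrest b
          · have hlt : np < p := lt_of_not_ge hge
            have hnp : np ∈ pvPRICES := hmem np List.mem_cons_self
            have hd : pvD np < pvD p := pvD_lt hnp hlt
            have hg : pvG k md oc od n np = pvG k md oc od m np :=
              ih m np (by omega) (by omega)
            simp only [hge, hg]
            exact ihl hrest _
      exact this pvPRICES (fun _ h => h) []

-- A's DFS equals chain ++ pvG
theorem pvDfsA_decompose (k md oc od : Int) :
    ∀ f : Nat, ∀ cp : Int, ∀ chain : List Int,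
      pvDfsA f k cp chain md oc od = chain ++ pvG k md oc od f cp := by
  intro f
  induction f with
  | zero => intro cp chain; simp [pvDfsA, pvG]
  | succ n ih =>
    intro cp chain
    show pvPRICES.foldl _ chain = chain ++ pvPRICES.foldl _ []
    have key : ∀ l : List Int, ∀ b : List Int,
        l.foldl (fun best np =>
          if np ≥ cp then best
          else
            let savings := cp - np
            let pool_cost := cp + oc
            let pool_disruption := md + od
            if pvApproved k savings md pool_cost pool_disruption then
              let candidate := pvDfsA n k np (chain ++ [np]) md oc od
              if candidate.length > best.length then candidate else best
            else best) (chain ++ b) =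
        chain ++ l.foldl (fun best np =>
          if np ≥ cp then best
          else if pvApproved k (cp - np) md (cp + oc) (md + od) then
            let cand := np :: pvG k md oc od n np
            if cand.length > best.length then cand else best
          else best) b := by
      intro l
      induction l with
      | nil => intro b; rfl
      | cons np rest ihl =>
        intro b
        simp only [List.foldl_cons]
        by_cases hge : np ≥ cp
        · simp only [hge, if_pos]; exact ihl b
        · simp only [hge]
          by_cases ha : pvApproved k (cp - np) md (cp + oc) (md + od) = true
          · simp only [ha, if_pos]
            have hc : pvDfsA n k np (chain ++ [np]) md oc od =
                chain ++ (np :: pvG k md oc od n np) := by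
              rw [ih np (chain ++ [np]), List.append_assoc]; rfl
            rw [hc]
            have hlen : (chain ++ (np :: pvG k md oc od n np)).length > (chain ++ b).length ↔
                (np :: pvG k md oc od n np).length > b.length := by
              simp [List.length_append]
            by_cases hl : (np :: pvG k md oc od n np).length > b.length
            · rw [if_pos (hlen.mpr hl), if_pos hl]; exact ihl _
            · rw [if_neg (fun h => hl (hlen.mp h)), if_neg hl]; exact ihl b
          · simp only [ha, if_neg, Bool.not_eq_true]
            exact ihl b
    have := key pvPRICES []
    simpa using this

-- when every element of l is ≥ p, the pvG-style fold does nothing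
theorem pv_foldl_skip' (k md oc od : Int) (f : Nat) (p : Int) :
    ∀ l : List Int, (∀ x ∈ l, p ≤ x) → ∀ b : List Int,
      l.foldl (fun best np =>
        if np ≥ p then best
        else if pvApproved k (p - np) md (p + oc) (md + od) then
          let cand := np :: pvG k md oc od f np
          if cand.length > best.length then cand else best
        else best) b = b := by
  intro l
  induction l with
  | nil => intro _ b; rfl
  | cons x rest ihl =>
    intro h b
    have hx : p ≤ x := h x List.mem_cons_self
    simp only [List.foldl_cons, ge_iff_le, hx, if_pos]
    exact ihl (fun y hy => h y (List.mem_cons_of_mem _ hy)) b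

-- the break-loop of B equals the skip-fold of pvG, given a correct memo
theorem pvGo_eq (k md oc od : Int) (f : Nat) (p : Int) (memo : PySem.Dict Int (List Int)) :
    ∀ l : List Int, l.Pairwise (· ≤ ·) →
      (∀ np ∈ l, np < p → memo.getD np [] = pvG k md oc od f np) →
      ∀ b : List Int,
        pvBestFromGo k md oc (md + od) memo p l b =
        l.foldl (fun best np =>
          if np ≥ p then best
          else if pvApproved k (p - np) md (p + oc) (md + od) then
            let cand := np :: pvG k md oc od f np
            if cand.length > best.length then cand else best
          else best) b := by
  intro l
  induction l with
  | nil => intro _ _ b; rfl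
  | cons np rest ihl =>
    intro hpw hmemo b
    have hpw' := (List.pairwise_cons.mp hpw).2
    have hhd := (List.pairwise_cons.mp hpw).1
    by_cases hge : np ≥ p
    · -- break: everything after is also ≥ p
      have hall : ∀ x ∈ rest, p ≤ x := fun x hx => le_trans hge (hhd x hx)
      simp only [pvBestFromGo, hge, if_pos, List.foldl_cons, ge_iff_le]
      rw [pv_foldl_skip' k md oc od f p rest hall b]
    · have hlt : np < p := lt_of_not_ge hge
      have hmnp : memo.getD np [] = pvG k md oc od f np :=
        hmemo np List.mem_cons_self hlt
      have hmemo' : ∀ x ∈ rest, x < p → memo.getD x [] = pvG k md oc od f x :=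
        fun x hx => hmemo x (List.mem_cons_of_mem _ hx)
      simp only [pvBestFromGo, hge, List.foldl_cons, hmnp]
      by_cases ha : pvApproved k (p - np) md (p + oc) (md + od) = true
      · simp only [ha, if_pos]
        by_cases hl : (np :: pvG k md oc od f np).length > b.length
        · simp only [hl, if_pos]; exact ihl hpw' hmemo' _
        · simp only [hl]; exact ihl hpw' hmemo' b
      · simp only [ha, if_neg, Bool.not_eq_true]
        exact ihl hpw' hmemo' b

-- memo-building invariant
theorem pvBuild (k md oc od : Int) :
    ∀ l pre : List Int, ∀ m : PySem.Dict Int (List Int),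
      pre ++ l = pvPRICES →
      (∀ q ∈ pre, m.getD q [] = pvG k md oc od (pvD q + 1) q) →
      ∀ q ∈ pvPRICES,
        (l.foldl (fun m p => m.insert p (pvBestFrom k md oc (md + od) m p)) m).getD q [] =
        pvG k md oc od (pvD q + 1) q := by
  intro l
  induction l with
  | nil =>
    intro pre m hsplit hpre q hq
    simp only [List.foldl_nil]
    rw [← hsplit] at hq
    exact hpre q (by simpa using hq)
  | cons p rest ihl =>
    intro pre m hsplit hpre q hq
    have hsorted : pvPRICES.Pairwise (· < ·) := by rw [pvPRICES_eq]; decide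
    have hsplit' : pvPRICES.Pairwise (· < ·) := hsorted
    rw [← hsplit] at hsplit'
    have hparts := List.pairwise_append.mp hsplit'
    have hcross : ∀ x ∈ pre, ∀ y ∈ p :: rest, x < y := hparts.2.2
    have hcons := List.pairwise_cons.mp hparts.2.1
    -- the freshly computed entry is correct
    have hbf : pvBestFrom k md oc (md + od) m p = pvG k md oc od (pvD p + 1) p := by
      unfold pvBestFrom
      have hpw : pvPRICES.Pairwise (· ≤ ·) :=
        hsorted.imp (fun h => le_of_lt h)
      rw [pvGo_eq k md oc od (pvD p) p m pvPRICES hpw ?_ []]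
      · rfl
      · intro np hnp hlt
        -- np ∈ pvPRICES and np < p ⇒ np ∈ pre
        have hnp' : np ∈ pre ++ p :: rest := hsplit ▸ hnp
        have hnpre : np ∈ pre := by
          rcases List.mem_append.mp hnp' with h | h
          · exact h
          · exfalso
            rcases List.mem_cons.mp h with rfl | h
            · exact lt_irrefl np hlt
            · exact absurd (hcons.1 np h) (by omega)
        rw [hpre np hnpre]
        exact pvG_stable k md oc od (pvD np + 1) (pvD p) np (by omega)
          (pvD_lt hnp hlt)
    simp only [List.foldl_cons]
    refine ihl (pre ++ [p]) _ (by rw [List.append_assoc]; simpa using hsplit) ?_ q hq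
    intro q' hq'
    rcases List.mem_append.mp hq' with hq' | hq'
    · have hne : q' ≠ p := ne_of_lt (hcross q' hq' p List.mem_cons_self)
      rw [PySem.Dict.getD_insert]
      rw [if_neg hne]
      exact hpre q' hq'
    · have : q' = p := by simpa using hq'
      subst this
      rw [PySem.Dict.getD_insert, if_pos rfl, hbf]

-- ===== VERDICT (by name: the statement is the Claim_ definition above) =====
theorem dfs_longest_chain_py_spec : Claim_equal_dfs_longest_chain_py := by
  intro k cp chain md oc od _
  unfold Spec_dfs_longest_chain_py dfs_longest_chain_py dfs_longest_chain_py_alt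
  rw [pvDfsA_decompose k md oc od 16 cp chain]
  congr 1
  -- pvG 16 cp = pvBestFrom with the fully built memo
  have hmemo := pvBuild k md oc od pvPRICES [] PySem.Dict.empty rfl (by simp)
  have hpw : pvPRICES.Pairwise (· ≤ ·) := by rw [pvPRICES_eq]; decide
  simp only [pvBestFrom] at hmemo ⊢
  rw [pvGo_eq k md oc od 15 cp _ pvPRICES hpw ?_ []]
  · rfl
  · intro np hnp _
    rw [hmemo np hnp]
    exact pvG_stable k md oc od (pvD np + 1) 15 np (by omega) (pvD_lt_card hnp)
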